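-- pv_equiv track=rewrite | github.com/pypi-data/pypi-mirror-99 | packages/determine-docker-tags/determine_docker_tags-0.1.6-py3-none-any.whl/determine_docker_tags/__init__.py | determine_tags
-- ===== SOURCE A (Python) =====
-- def determine_tags(version_string, app_env, include_major, include_suffix):
--     tags = ""
--
--     if "-" in version_string:
--         extra_info = version_string[version_string.find("-") :]
--         version_string = version_string[: version_string.find("-")]
--     else:
--         extra_info = ""
--
--     if include_suffix == "no":
--         extra_info = ""
--
--     if app_env:
--         app_env = "-" + app_env
--     else:
--         app_env = ""
--
--     while "." in version_string:
--         tags = tags + version_string + extra_info + app_env + ","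
--         version_string = version_string[: version_string.rfind(".")]
--
--     if include_major == "yes" and version_string != "0":
--         tags = tags + version_string + extra_info + app_env
--     else:
--         tags = tags[:-1]
--
--     return tags
-- ===== SOURCE B (Python) =====
-- def determine_tags(version_string, app_env, include_major, include_suffix):
--     if "-" in version_string:
--         dash = version_string.find("-")
--         extra_info = version_string[dash:]
--         version_string = version_string[:dash]
--     else:
--         extra_info = ""
--     if include_suffix == "no":
--         extra_info = ""
--     suffix = extra_info + ("-" + app_env if app_env else "")
--     parts = version_string.split(".")
--     tags = [".".join(parts[:i]) + suffix for i in range(2, len(parts) + 1)]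
--     tags.reverse()
--     if include_major == "yes" and parts[0] != "0":
--         tags.append(parts[0] + suffix)
--     return ",".join(tags)
-- ===== Notes on version B (the rewrite author's own statement) =====
-- stated objective: simpler
-- what changed: A repeatedly truncates the version string at its last dot with rfind while concatenating a comma-terminated tag string and finally strips or replaces the trailing comma; B splits the version once on '.', builds the list of dotted prefixes by slicing the parts list, optionally appends the major tag, and joins the list with commas.
import Mathlib
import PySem

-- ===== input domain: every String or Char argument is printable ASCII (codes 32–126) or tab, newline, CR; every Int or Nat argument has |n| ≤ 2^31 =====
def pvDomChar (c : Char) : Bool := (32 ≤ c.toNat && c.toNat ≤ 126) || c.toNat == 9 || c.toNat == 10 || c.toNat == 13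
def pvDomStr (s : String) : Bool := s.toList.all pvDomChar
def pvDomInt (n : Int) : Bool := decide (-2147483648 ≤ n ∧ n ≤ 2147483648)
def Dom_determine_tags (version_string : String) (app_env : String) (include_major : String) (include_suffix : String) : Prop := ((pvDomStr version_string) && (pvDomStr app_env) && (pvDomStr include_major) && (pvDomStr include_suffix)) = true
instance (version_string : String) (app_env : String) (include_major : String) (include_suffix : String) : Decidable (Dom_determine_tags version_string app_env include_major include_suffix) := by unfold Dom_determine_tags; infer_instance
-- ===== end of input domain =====

-- B replaces A's destructive while/rfind truncation loop by split('.') plus a joined list of dotted prefixes; objective: simpler.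

-- ===== PORT A =====
-- termination lemmas for A's while loop (the truncated string is strictly shorter); cited in decreasing_by
theorem pv_rfind_go_le (s : List Char) (k : Nat) : PySem.Chars.rfind.go s ['.'] k ≤ (k : Int) := by
  induction k with
  | zero => unfold PySem.Chars.rfind.go; split <;> simp
  | succ j ih => unfold PySem.Chars.rfind.go; split
                 · simp
                 · exact le_trans ih (by push_cast; omega)

theorem pv_rfind_lt (s : List Char) (h : s ≠ []) : PySem.Chars.rfind s ['.'] < (s.length : Int) := by
  obtain ⟨m, hm⟩ : ∃ m, s.length = m + 1 := by cases s <;> simp_all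
  unfold PySem.Chars.rfind
  rw [hm]
  unfold PySem.Chars.rfind.go
  have hdrop : s.drop (m + 1) = [] := by rw [List.drop_eq_nil_of_le (by omega)]
  rw [hdrop]
  simp only [List.isPrefixOf]
  have := pv_rfind_go_le s m
  split <;> simp_all

theorem pv_shrink (vs : List Char) (h : vs ≠ []) :
    (PySem.List.slice vs none (some (PySem.Chars.rfind vs ['.']))).length < vs.length := by
  have hlt := pv_rfind_lt vs h
  have hn : 0 < vs.length := by cases vs <;> simp_all
  simp only [PySem.List.slice, PySem.List.clampIdx]
  set r := PySem.Chars.rfind vs ['.'] with hr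
  by_cases h0 : r < 0
  · by_cases h1 : (vs.length : Int) + r < 0 <;> simp [h0, h1, List.length_take] <;> omega
  · simp [h0, List.length_take]; omega

def detA_loop (extra env tags vs : List Char) : List Char × List Char :=
  if h : PySem.Chars.isIn ['.'] vs = true then
    detA_loop extra env (tags ++ vs ++ extra ++ env ++ [','])
      (PySem.List.slice vs none (some (PySem.Chars.rfind vs ['.'])))
  else (tags, vs)
termination_by vs.length
decreasing_by
  apply pv_shrink
  intro hnil
  rw [hnil] at h
  exact absurd h (by decide)

def determine_tags (version_string : String) (app_env : String) (include_major : String) (include_suffix : String) : String :=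
  let vs0 := version_string.toList
  let extra0 : List Char :=
    if PySem.Chars.isIn ['-'] vs0 = true then PySem.List.slice vs0 (some (PySem.Chars.find vs0 ['-'])) none else []
  let vs1 : List Char :=
    if PySem.Chars.isIn ['-'] vs0 = true then PySem.List.slice vs0 none (some (PySem.Chars.find vs0 ['-'])) else vs0
  let extra : List Char := if include_suffix = "no" then [] else extra0
  let env : List Char := if app_env ≠ "" then '-' :: app_env.toList else []
  let p := detA_loop extra env [] vs1
  let tags2 : List Char :=
    if include_major = "yes" ∧ p.2 ≠ ['0'] then p.1 ++ p.2 ++ extra ++ env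
    else PySem.List.slice p.1 none (some (-1))
  String.ofList tags2

-- ===== PORT B =====
def determine_tags_alt (version_string : String) (app_env : String) (include_major : String) (include_suffix : String) : String :=
  let vs0 := version_string.toList
  let extra0 : List Char :=
    if PySem.Chars.isIn ['-'] vs0 = true then PySem.List.slice vs0 (some (PySem.Chars.find vs0 ['-'])) none else []
  let vs1 : List Char :=
    if PySem.Chars.isIn ['-'] vs0 = true then PySem.List.slice vs0 none (some (PySem.Chars.find vs0 ['-'])) else vs0
  let extra : List Char := if include_suffix = "no" then [] else extra0
  let suffix : List Char := extra ++ (if app_env ≠ "" then '-' :: app_env.toList else [])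
  let parts := PySem.Chars.splitOn vs1 ['.']
  let tags : List (List Char) :=
    ((PySem.List.pyRange 2 ((parts.length : Int) + 1) 1).map
      (fun i => PySem.Chars.join ['.'] (PySem.List.slice parts none (some i)) ++ suffix)).reverse
  let major := PySem.List.pyGetD parts 0 []   -- parts[0]; split never returns an empty list
  let tags2 := if include_major = "yes" ∧ major ≠ ['0'] then tags ++ [major ++ suffix] else tags
  String.ofList (PySem.Chars.join [','] tags2)

-- ===== PRECONDITION & SPEC =====
def Spec_determine_tags (version_string : String) (app_env : String) (include_major : String) (include_suffix : String) (out : String) : Prop := out = determine_tags_alt version_string app_env include_major include_suffix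
instance (version_string : String) (app_env : String) (include_major : String) (include_suffix : String) (out : String) : Decidable (Spec_determine_tags version_string app_env include_major include_suffix out) := by unfold Spec_determine_tags; infer_instance

-- ===== CLAIM (what is proved, stated in full; the proofs are below) =====
def Claim_equal_determine_tags : Prop := ∀ (version_string : String) (app_env : String) (include_major : String) (include_suffix : String), Dom_determine_tags version_string app_env include_major include_suffix → Spec_determine_tags version_string app_env include_major include_suffix (determine_tags version_string app_env include_major include_suffix)

-- ===== LEMMAS AND PROOFS =====

-- structural model of str.split('.') used only in the proofs
def pvSplit (pre : List Char) : List Char → List (List Char)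
  | [] => [pre]
  | c :: t => if c = '.' then pre :: pvSplit [] t else pvSplit (pre ++ [c]) t

theorem pv_splitOn_go_eq (fuel : Nat) (l cur : List Char) (acc : List (List Char))
    (h : l.length < fuel) :
    PySem.Chars.splitOn.go ['.'] fuel l cur acc = acc.reverse ++ pvSplit cur.reverse l := by
  induction fuel generalizing l cur acc with
  | zero => omega
  | succ f ih =>
    cases l with
    | nil => unfold PySem.Chars.splitOn.go; simp [pvSplit]
    | cons c rest =>
      unfold PySem.Chars.splitOn.go
      by_cases hc : c = '.'
      · subst hc
        have hp : (['.'] : List Char).isPrefixOf ('.' :: rest) = true := by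
          simp [List.isPrefixOf]
        simp only [hp, if_true, List.length_cons] at *
        rw [ih _ _ _ (by simpa using h)]
        simp [pvSplit]
      · have hp : (['.'] : List Char).isPrefixOf (c :: rest) = false := by
          simp [List.isPrefixOf]
          exact fun h' => hc h'.symm
        simp only [hp, Bool.false_eq_true, if_false]
        rw [ih _ _ _ (by simpa using h)]
        simp [pvSplit, hc]

theorem pv_splitOn_eq (s : List Char) : PySem.Chars.splitOn s ['.'] = pvSplit [] s := by
  unfold PySem.Chars.splitOn
  rw [pv_splitOn_go_eq _ _ _ _ (by omega)]
  simp

theorem pv_pvSplit_ne_nil (pre l : List Char) : pvSplit pre l ≠ [] := by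
  induction l generalizing pre with
  | nil => simp [pvSplit]
  | cons c t ih => by_cases hc : c = '.' <;> simp [pvSplit, hc, ih]

theorem pv_pvSplit_clean (pre l : List Char) (hp : '.' ∉ pre) :
    ∀ p ∈ pvSplit pre l, '.' ∉ p := by
  induction l generalizing pre with
  | nil => simpa [pvSplit] using hp
  | cons c t ih =>
    by_cases hc : c = '.'
    · subst hc
      intro p hmem
      simp [pvSplit] at hmem
      rcases hmem with rfl | hmem
      · exact hp
      · exact ih [] (by simp) p hmem
    · intro p hmem
      simp [pvSplit, hc] at hmem
      exact ih (pre ++ [c]) (by simp [hp]; exact fun h' => hc h'.symm) p hmem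

theorem pv_intercalate_cons (sep a : List Char) (rest : List (List Char)) (h : rest ≠ []) :
    List.intercalate sep (a :: rest) = a ++ sep ++ List.intercalate sep rest := by
  cases rest with
  | nil => exact absurd rfl h
  | cons b bs => simp [List.intercalate, List.intersperse]

theorem pv_pvSplit_join (pre l : List Char) :
    List.intercalate ['.'] (pvSplit pre l) = pre ++ l := by
  induction l generalizing pre with
  | nil => simp [pvSplit, List.intercalate]
  | cons c t ih =>
    by_cases hc : c = '.'
    · subst hc
      rw [pvSplit, if_pos rfl, pv_intercalate_cons _ _ _ (pv_pvSplit_ne_nil _ _), ih]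
      simp
    · rw [pvSplit, if_neg hc, ih]
      simp

-- prefixes of parts that still contain a dot, longest first
def pvPref (parts : List (List Char)) : List (List Char) :=
  ((List.range' 2 (parts.length - 1)).map (fun i => List.intercalate ['.'] (parts.take i))).reverse

theorem pv_intercalate_concat (sep q : List Char) (ps : List (List Char)) (h : ps ≠ []) :
    List.intercalate sep (ps ++ [q]) = List.intercalate sep ps ++ sep ++ q := by
  induction ps with
  | nil => exact absurd rfl h
  | cons a rest ih =>
    cases hr : rest with
    | nil => simp [List.intercalate, List.intersperse]
    | cons b bs =>
      subst hr
      rw [List.cons_append, pv_intercalate_cons sep a (b :: bs ++ [q]) (by simp),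
        pv_intercalate_cons sep a (b :: bs) (by simp), ih (by simp)]
      simp

theorem pv_isIn_dot (s : List Char) : PySem.Chars.isIn ['.'] s = true ↔ '.' ∈ s := by
  rw [PySem.Chars.isIn_iff_infix, List.singleton_infix_iff]

theorem pv_dot_prefix_false (bs : List Char) (h : '.' ∉ bs) (m : Nat) :
    (['.'] : List Char).isPrefixOf (bs.drop m) = false := by
  cases hd : bs.drop m with
  | nil => simp [List.isPrefixOf]
  | cons d ds =>
    have hmem : d ∈ bs := List.mem_of_mem_drop (by rw [hd]; exact List.mem_cons_self)
    simp [List.isPrefixOf]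
    exact fun h' => h (h' ▸ hmem)

theorem pv_rfind_go_last (as bs : List Char) (h : '.' ∉ bs) (k : Nat)
    (h1 : as.length ≤ k) (h2 : k ≤ (as ++ '.' :: bs).length) :
    PySem.Chars.rfind.go (as ++ '.' :: bs) ['.'] k = (as.length : Int) := by
  induction k, h1 using Nat.le_induction with
  | base =>
    cases as with
    | nil =>
      unfold PySem.Chars.rfind.go
      simp [List.isPrefixOf]
    | cons a as' =>
      show PySem.Chars.rfind.go ((a :: as') ++ '.' :: bs) ['.'] (as'.length + 1) =
        ((as'.length + 1 : Nat) : Int)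
      unfold PySem.Chars.rfind.go
      have hdrop : ((a :: as') ++ '.' :: bs).drop (as'.length + 1) = '.' :: bs := by
        have : as'.length + 1 = (a :: as').length := rfl
        rw [this, List.drop_left]
      rw [hdrop]
      simp [List.isPrefixOf]
  | succ k hk ih =>
    unfold PySem.Chars.rfind.go
    have hdrop : (as ++ '.' :: bs).drop (k + 1) = bs.drop (k - as.length) := by
      rw [List.drop_append]
      rw [List.drop_eq_nil_of_le (by omega : as.length ≤ k + 1), List.nil_append]
      have : k + 1 - as.length = (k - as.length) + 1 := by omega
      rw [this, List.drop_succ_cons]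
    rw [hdrop, pv_dot_prefix_false bs h]
    simp only [Bool.false_eq_true, if_false]
    exact ih (by simp at h2 ⊢; omega)

theorem pv_rfind_last (as bs : List Char) (h : '.' ∉ bs) :
    PySem.Chars.rfind (as ++ '.' :: bs) ['.'] = (as.length : Int) := by
  unfold PySem.Chars.rfind
  exact pv_rfind_go_last as bs h _ (by simp) le_rfl

theorem pv_trunc (as bs : List Char) (h : '.' ∉ bs) :
    PySem.List.slice (as ++ '.' :: bs) none (some (PySem.Chars.rfind (as ++ '.' :: bs) ['.'])) = as := by
  rw [pv_rfind_last as bs h]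
  simp only [PySem.List.slice, PySem.List.clampIdx]
  have h1 : ¬ ((as.length : Int) < 0) := by omega
  rw [if_neg h1]
  have h2 : min (as.length : Int).toNat (as ++ '.' :: bs).length = as.length := by
    simp
  simp only [h2, Nat.sub_zero, List.drop_zero]
  rw [List.take_append_of_le_length le_rfl, List.take_length]

theorem pv_pvPref_concat (ps : List (List Char)) (q : List Char) (h : ps ≠ []) :
    pvPref (ps ++ [q]) = List.intercalate ['.'] (ps ++ [q]) :: pvPref ps := by
  obtain ⟨m, hm⟩ : ∃ m, ps.length = m + 1 := by cases ps <;> simp_all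
  unfold pvPref
  have hlen : (ps ++ [q]).length - 1 = m + 1 := by simp [hm]
  rw [hlen, hm, List.range'_1_concat]
  simp only [List.map_append, List.map_cons, List.map_nil, List.reverse_append,
    List.reverse_cons, List.reverse_nil, List.nil_append, List.cons_append, Nat.add_succ_sub_one]
  congr 1
  · congr 1
    exact List.take_of_length_le (by simp [hm]; omega)
  · congr 1
    apply List.map_congr_left
    intro i hi
    have : i ≤ ps.length := by
      have := (List.mem_range'_1.mp hi).2
      omega
    rw [List.take_append_of_le_length this]

theorem pv_loop_main (extra env : List Char) (parts : List (List Char)) (hne : parts ≠ [])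
    (hclean : ∀ p ∈ parts, '.' ∉ p) (tags : List Char) :
    detA_loop extra env tags (List.intercalate ['.'] parts) =
      (tags ++ List.flatten ((pvPref parts).map (fun p => p ++ extra ++ env ++ [','])), parts.headI) := by
  induction parts using List.reverseRecOn generalizing tags with
  | nil => exact absurd rfl hne
  | append_singleton ps q ih =>
    have hq : '.' ∉ q := hclean q (by simp)
    clear hne
    cases ps with
    | nil =>
      have hone : List.intercalate ['.'] ([] ++ [q]) = q := by
        simp [List.intercalate]
      rw [hone]
      unfold detA_loop
      have hnotin : ¬ (PySem.Chars.isIn ['.'] q = true) := by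
        rw [pv_isIn_dot]; exact hq
      rw [dif_neg hnotin]
      simp [pvPref]
    | cons a as' =>
      have hPne : (a :: as') ≠ [] := by simp
      have hic : List.intercalate ['.'] ((a :: as') ++ [q]) =
          List.intercalate ['.'] (a :: as') ++ '.' :: q := by
        rw [pv_intercalate_concat _ _ _ hPne]; simp
      rw [hic]
      unfold detA_loop
      have hin : PySem.Chars.isIn ['.'] (List.intercalate ['.'] (a :: as') ++ '.' :: q) = true := by
        rw [pv_isIn_dot]; simp
      rw [dif_pos hin, pv_trunc _ _ hq]
      rw [ih hPne (fun p hp => hclean p (List.mem_append_left _ hp))]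
      rw [pv_pvPref_concat _ _ hPne, hic]
      simp [List.append_assoc]

theorem pv_flatten_comma (xs : List (List Char)) (h : xs ≠ []) :
    List.flatten (xs.map (· ++ [','])) = List.intercalate [','] xs ++ [','] := by
  induction xs with
  | nil => exact absurd rfl h
  | cons a rest ih =>
    cases rest with
    | nil => simp [List.intercalate, List.intersperse]
    | cons b bs =>
      rw [List.map_cons, List.flatten_cons, ih (by simp),
        pv_intercalate_cons [','] a (b :: bs) (by simp)]
      simp

theorem pv_pyGetD_zero (xs : List (List Char)) : PySem.List.pyGetD xs 0 [] = xs.headI := by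
  cases xs with
  | nil => rfl
  | cons a t => simp [PySem.List.pyGetD, PySem.List.pyGet?, PySem.List.pyIdx?]

theorem pv_slice_nonneg {α : Type} (xs : List α) (i : Int) (h : 0 ≤ i) :
    PySem.List.slice xs none (some i) = xs.take i.toNat := by
  simp only [PySem.List.slice, PySem.List.clampIdx, if_neg (by omega : ¬ i < 0)]
  rcases Nat.le_total i.toNat xs.length with h2 | h2
  · simp [Nat.min_eq_left h2]
  · simp [Nat.min_eq_right h2, List.take_length, List.take_of_length_le h2]

theorem pv_slice_neg_one (xs : List Char) : PySem.List.slice xs none (some (-1)) = xs.dropLast := by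
  cases xs with
  | nil => rfl
  | cons a t =>
    simp only [PySem.List.slice, PySem.List.clampIdx]
    norm_num
    rw [if_neg (by omega), List.dropLast_eq_take]
    simp

theorem pv_B_list (parts : List (List Char)) (suffix : List Char) :
    ((PySem.List.pyRange 2 ((parts.length : Int) + 1) 1).map
      (fun i => PySem.Chars.join ['.'] (PySem.List.slice parts none (some i)) ++ suffix)).reverse
    = (pvPref parts).map (· ++ suffix) := by
  have hcount :
      (if (2:Int) < (parts.length : Int) + 1
        then (((parts.length : Int) + 1 - 2 + 1 - 1) / 1).toNat else 0) = parts.length - 1 := by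
    split
    · rw [Int.ediv_one]; omega
    · omega
  unfold PySem.List.pyRange
  rw [if_neg (by omega : ¬ (1:Int) = 0), if_pos (by omega : (0:Int) < 1), hcount]
  unfold pvPref
  rw [List.map_reverse, List.map_map, List.range'_eq_map_range, List.map_map, List.map_map]
  congr 1
  apply List.map_congr_left
  intro k _
  simp only [Function.comp]
  rw [pv_slice_nonneg parts (2 + 1 * (k : Int)) (by omega),
    (by omega : ((2:Int) + 1 * (k : Int)).toNat = 2 + k)]
  simp [PySem.Chars.join]

theorem pv_join_core (extra env vs1 : List Char) (im : String) :
    (if im = "yes" ∧ (detA_loop extra env [] vs1).2 ≠ ['0'] then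
      (detA_loop extra env [] vs1).1 ++ (detA_loop extra env [] vs1).2 ++ extra ++ env
    else PySem.List.slice (detA_loop extra env [] vs1).1 none (some (-1)))
    =
    PySem.Chars.join [',']
      (if im = "yes" ∧ PySem.List.pyGetD (PySem.Chars.splitOn vs1 ['.']) 0 [] ≠ ['0'] then
        ((PySem.List.pyRange 2 (((PySem.Chars.splitOn vs1 ['.']).length : Int) + 1) 1).map
          (fun i => PySem.Chars.join ['.'] (PySem.List.slice (PySem.Chars.splitOn vs1 ['.']) none (some i))
            ++ (extra ++ env))).reverse
          ++ [PySem.List.pyGetD (PySem.Chars.splitOn vs1 ['.']) 0 [] ++ (extra ++ env)]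
      else
        ((PySem.List.pyRange 2 (((PySem.Chars.splitOn vs1 ['.']).length : Int) + 1) 1).map
          (fun i => PySem.Chars.join ['.'] (PySem.List.slice (PySem.Chars.splitOn vs1 ['.']) none (some i))
            ++ (extra ++ env))).reverse) := by
  rw [pv_splitOn_eq, pv_B_list, pv_pyGetD_zero]
  have hne := pv_pvSplit_ne_nil [] vs1
  have hclean := pv_pvSplit_clean [] vs1 (by simp)
  have hjoin := pv_pvSplit_join [] vs1
  simp only [List.nil_append] at hjoin
  have hL : detA_loop extra env [] vs1 =
      (List.flatten ((pvPref (pvSplit [] vs1)).map (fun p => p ++ extra ++ env ++ [','])),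
        (pvSplit [] vs1).headI) := by
    conv_lhs => rw [← hjoin]
    rw [pv_loop_main extra env _ hne hclean []]
    simp
  rw [hL]
  dsimp only
  have hmap : (pvPref (pvSplit [] vs1)).map (fun p => p ++ extra ++ env ++ [','])
      = ((pvPref (pvSplit [] vs1)).map (· ++ (extra ++ env))).map (· ++ [',']) := by
    rw [List.map_map]
    apply List.map_congr_left
    intro p _
    simp [List.append_assoc]
  rw [hmap]
  set E := (pvPref (pvSplit [] vs1)).map (· ++ (extra ++ env)) with hE
  by_cases hEnil : E = []
  · rw [hEnil]
    split_ifs <;> simp [PySem.Chars.join, List.intercalate, PySem.List.slice,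
      PySem.List.clampIdx, List.append_assoc]
  · split_ifs with hcond
    · rw [pv_flatten_comma E hEnil, PySem.Chars.join, pv_intercalate_concat _ _ _ hEnil]
      simp [List.append_assoc]
    · rw [pv_flatten_comma E hEnil, pv_slice_neg_one, List.dropLast_concat, PySem.Chars.join]

-- ===== VERDICT (by name: the statement is the Claim_ definition above) =====
theorem determine_tags_spec : Claim_equal_determine_tags := by
  unfold Claim_equal_determine_tags
  intro version_string app_env include_major include_suffix _
  unfold Spec_determine_tags determine_tags determine_tags_alt
  dsimp only
  rw [pv_join_core]
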